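-- pv_equiv track=rewrite | github.com/SHRIVISHNU-CM/Pagination_React | python/P1.py | count_fav
-- ===== SOURCE A (Python) =====
-- def count_fav(n, playlist):
--     singer_count = {}
--     for singer in playlist:
--         if singer in singer_count:
--             singer_count[singer] +=1
--         else:
--             singer_count[singer] = 1
--
--     max_count = max(singer_count.values())
--
--     num_fav = sum(1 for count in singer_count.values() if count == max_count)
--     return num_fav
-- ===== SOURCE B (Python) =====
-- def count_fav(n, playlist):
--     p = sorted(playlist)
--     length = len(p)
--     best = 0
--     ties = 0
--     i = 0
--     while i < length:
--         j = i + 1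
--         while j < length and p[j] == p[i]:
--             j += 1
--         run = j - i
--         if run > best:
--             best = run
--             ties = 1
--         elif run == best:
--             ties += 1
--         i = j
--     return ties
-- ===== Notes on version B (the rewrite author's own statement) =====
-- stated objective: alternative
-- what changed: B drops the dictionary entirely: it sorts the playlist and scans it once with two index pointers, measuring each maximal run of equal singers and tracking the longest run length and the number of runs attaining it.
import Mathlib
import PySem

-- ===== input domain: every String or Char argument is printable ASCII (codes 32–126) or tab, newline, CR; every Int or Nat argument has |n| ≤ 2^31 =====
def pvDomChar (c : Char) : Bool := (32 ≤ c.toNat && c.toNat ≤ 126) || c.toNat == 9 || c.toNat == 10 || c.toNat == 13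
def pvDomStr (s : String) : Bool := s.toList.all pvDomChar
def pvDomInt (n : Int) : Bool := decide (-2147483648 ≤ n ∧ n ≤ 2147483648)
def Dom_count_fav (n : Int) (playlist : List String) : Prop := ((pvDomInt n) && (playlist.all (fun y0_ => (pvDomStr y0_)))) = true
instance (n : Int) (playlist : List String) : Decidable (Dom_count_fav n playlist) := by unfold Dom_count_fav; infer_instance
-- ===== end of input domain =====

-- B sorts the playlist and counts maximal runs of equal singers in one scan instead of building a dict and scanning its values twice; return value only.


-- ===== PORT A =====
def count_fav (n : Int) (playlist : List String) : Int :=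
  let singer_count : PySem.Dict String Int :=
    playlist.foldl (fun d singer =>
      if d.contains singer then d.insert singer (d.getD singer 0 + 1)
      else d.insert singer 1) PySem.Dict.empty
  -- max(...) raises ValueError on an empty dict: Pre_ requires playlist ≠ []
  let max_count : Int := (PySem.List.max? singer_count.values (fun x => x)).getD 0
  singer_count.values.foldl (fun acc c => if c = max_count then acc + 1 else acc) 0

-- ===== PORT B =====
-- outer while loop of Source B: consume one maximal run of the (sorted) list per step;
-- the inner while (advance j while p[j] == p[i]) is the takeWhile/dropWhile split.
def pvRunLoop (l : List String) (best ties : Int) : Int :=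
  match l with
  | [] => ties
  | x :: rest =>
    let run : Int := 1 + ((rest.takeWhile (fun y => y == x)).length : Int)
    let rest' := rest.dropWhile (fun y => y == x)
    if run > best then pvRunLoop rest' run 1
    else if run = best then pvRunLoop rest' best (ties + 1)
    else pvRunLoop rest' best ties
termination_by l.length
decreasing_by
  all_goals
    simpa using Nat.lt_succ_of_le (List.length_dropWhile_le (fun y => y == x) rest)

def count_fav_alt (n : Int) (playlist : List String) : Int :=
  pvRunLoop (PySem.List.sorted playlist (fun x => x)) 0 0

-- ===== PRECONDITION & SPEC =====
-- Pre_ excludes exactly the empty playlist, on which A's max() raises ValueError.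
def Pre_count_fav (n : Int) (playlist : List String) : Prop := playlist ≠ []
instance (n : Int) (playlist : List String) : Decidable (Pre_count_fav n playlist) := by unfold Pre_count_fav; infer_instance
def pvWitness_count_fav : Int × List String := (0, ["a", "b", "a"])

def Spec_count_fav (n : Int) (playlist : List String) (out : Int) : Prop := out = count_fav_alt n playlist
instance (n : Int) (playlist : List String) (out : Int) : Decidable (Spec_count_fav n playlist out) := by unfold Spec_count_fav; infer_instance

-- ===== CLAIM (what is proved, stated in full; the proofs are below) =====
def Claim_equal_count_fav : Prop := ∀ (n : Int) (playlist : List String), Dom_count_fav n playlist → Pre_count_fav n playlist → Spec_count_fav n playlist (count_fav n playlist)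

-- ===== LEMMAS AND PROOFS =====

-- A's dict-building step equals the unconditional counting step (when the key is absent, getD gives 0).
lemma step_eq (d : PySem.Dict String Int) (s : String) :
    (if d.contains s then d.insert s (d.getD s 0 + 1) else d.insert s 1)
      = d.insert s (d.getD s 0 + 1) := by
  by_cases h : d.contains s = true
  · simp [h]
  · have h' : d.contains s = false := by simpa using h
    simp [h', PySem.Dict.getD_of_not_contains d 0 h']

-- the list of run lengths of a list (B consumes one run per step of pvRunLoop)
def pvRuns (l : List String) : List Int :=
  match l with
  | [] => []
  | x :: rest =>
    (1 + ((rest.takeWhile (fun y => y == x)).length : Int))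
      :: pvRuns (rest.dropWhile (fun y => y == x))
termination_by l.length
decreasing_by
  all_goals
    simpa using Nat.lt_succ_of_le (List.length_dropWhile_le (fun y => y == x) rest)

-- B's loop is the (max, tie-count) pair fold over the run lengths.
lemma pvRunLoop_eq_fold : ∀ (k : Nat) (l : List String) (b t : Int), l.length ≤ k →
    pvRunLoop l b t
      = ((pvRuns l).foldl (fun p c => if c > p.1 then (c, 1) else if c = p.1 then (p.1, p.2 + 1) else p) (b, t)).2 := by
  intro k
  induction k with
  | zero =>
    intro l b t h
    have : l = [] := List.eq_nil_of_length_eq_zero (Nat.le_zero.mp h)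
    subst this; simp [pvRunLoop, pvRuns]
  | succ k ih =>
    intro l b t h
    cases l with
    | nil => simp [pvRunLoop, pvRuns]
    | cons x rest =>
      have hlen : (rest.dropWhile (fun y => y == x)).length ≤ k := by
        have := List.length_dropWhile_le (fun y => y == x) rest
        simp at h; omega
      rw [pvRunLoop, pvRuns]
      simp only [List.foldl_cons]
      set run : Int := 1 + ((rest.takeWhile (fun y => y == x)).length : Int) with hrun
      by_cases h1 : run > b
      · rw [if_pos h1, if_pos h1, ih _ _ _ hlen]
      · by_cases h2 : run = b
        · rw [if_neg h1, if_pos h2, if_neg h1, if_pos h2, ih _ _ _ hlen]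
        · rw [if_neg h1, if_neg h2, if_neg h1, if_neg h2, ih _ _ _ hlen]

-- the pair fold characterised: running max and count of the running max (with a reset marker).
lemma fold_pair (l : List Int) (m k : Int) :
    l.foldl (fun p c => if c > p.1 then (c, 1) else if c = p.1 then (p.1, p.2 + 1) else p) (m, k)
      = (l.foldl max m,
         (if l.foldl max m = m then k else 0) + (l.count (l.foldl max m) : Int)) := by
  induction l generalizing m k with
  | nil => simp
  | cons a t ih =>
    have hle : ∀ m0 : Int, m0 ≤ t.foldl max m0 := fun m0 => (PySem.List.le_foldl_max t m0).1
    simp only [List.foldl_cons, List.count_cons]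
    by_cases h1 : a > m
    · have hmax : max m a = a := by omega
      rw [if_pos h1, ih]
      simp only [hmax]
      have hM : m < t.foldl max a := lt_of_lt_of_le h1 (hle a)
      have hMm : t.foldl max a ≠ m := by omega
      rw [if_neg hMm]
      by_cases h2 : t.foldl max a = a
      · simp [h2]; ring
      · have : (a == t.foldl max a) = false := by
          simp; omega
        simp [this, h2]
    · by_cases h2 : a = m
      · have hmax : max m a = m := by omega
        rw [if_neg h1, if_pos h2, ih]
        simp only [hmax]
        by_cases h3 : t.foldl max m = m
        · rw [if_pos h3]
          simp [h2, h3]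
          omega
        · have : (a == t.foldl max m) = false := by simp; omega
          simp [this, h3]
      · have hmax : max m a = m := by omega
        rw [if_neg h1, if_neg h2, ih]
        simp only [hmax]
        have : (a == t.foldl max m) = false := by
          have := hle m
          simp; omega
        simp [this]

-- A's 0/1 generator sum over the values is countP (= count of the max).
lemma fold_count (l : List Int) (M : Int) :
    l.foldl (fun acc c => if c = M then acc + 1 else acc) 0 = (l.count M : Int) := by
  rw [PySem.List.foldl_ite_add_one (fun c => c = M) l 0]
  have hp : (fun x : Int => decide (x = M)) = (fun x : Int => x == M) := by
    funext x; by_cases h : x = M <;> simp [h]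
  simp [List.count_eq_countP, hp]

-- PySem.Set.add bookkeeping for the dedup of a sorted list
lemma ofList_cons_shift (x : String) : ∀ (l : List String) (s : List String), x ∉ l →
    l.foldl PySem.Set.add (x :: s) = x :: l.foldl PySem.Set.add s := by
  intro l
  induction l with
  | nil => intro s _; rfl
  | cons y t ih =>
    intro s hx
    have hyx : y ≠ x := fun h => hx (by simp [h])
    have hadd : PySem.Set.add (x :: s) y = x :: PySem.Set.add s y := by
      by_cases h : y ∈ s <;> simp [PySem.Set.add, hyx, h]
    simp only [List.foldl_cons, hadd]
    exact ih _ (fun h => hx (by simp [h]))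

lemma foldl_add_const (x : String) : ∀ (l : List String) (s : List String), (∀ y ∈ l, y = x) → x ∈ s →
    l.foldl PySem.Set.add s = s := by
  intro l
  induction l with
  | nil => intro s _ _; rfl
  | cons y t ih =>
    intro s hall hx
    have hy : y = x := hall y (by simp)
    have : PySem.Set.add s y = s := by
      simp only [PySem.Set.add, hy]
      rw [if_pos (by simpa using hx)]
    simp only [List.foldl_cons, this]
    exact ih s (fun z hz => hall z (by simp [hz])) hx

-- runs of a sorted list are exactly the multiplicities of its distinct elements, in first-occurrence order
lemma runs_sorted : ∀ (k : Nat) (l : List String), l.length ≤ k →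
    l.Pairwise (fun a b => a ≤ b) →
    pvRuns l = (PySem.List.dedup l).map (fun s => (l.count s : Int)) := by
  intro k
  induction k with
  | zero =>
    intro l h _
    have : l = [] := List.eq_nil_of_length_eq_zero (Nat.le_zero.mp h)
    subst this; simp [pvRuns, PySem.List.dedup, PySem.Set.ofList]
  | succ k ih =>
    intro l h hsorted
    cases l with
    | nil => simp [pvRuns, PySem.List.dedup, PySem.Set.ofList]
    | cons x rest =>
      set tk := rest.takeWhile (fun y => y == x) with htk
      set dr := rest.dropWhile (fun y => y == x) with hdr
      have hsplit : tk ++ dr = rest := List.takeWhile_append_dropWhile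
      have htkx : ∀ y ∈ tk, y = x := by
        intro y hy
        simpa using List.mem_takeWhile_imp hy
      have hrest : ∀ y ∈ rest, x ≤ y := (List.pairwise_cons.mp hsorted).1
      have hdrsorted : dr.Pairwise (fun a b => a ≤ b) :=
        List.Pairwise.sublist (List.dropWhile_sublist _) (List.pairwise_cons.mp hsorted).2
      -- x does not occur in dr: its head differs from x, and everything after is ≥ head > x
      have hxdr : x ∉ dr := by
        intro hx
        cases hdr' : dr with
        | nil => rw [hdr'] at hx; simp at hx
        | cons d dt =>
          have hdhead : (d == x) = false := by
            have hne : rest.dropWhile (fun y => y == x) ≠ [] := by rw [← hdr, hdr']; simp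
            have hh := List.head_dropWhile_not (fun y => y == x) hne
            have hdd : (rest.dropWhile (fun y => y == x)).head hne = d := by
              simp [← hdr, hdr']
            rwa [hdd] at hh
          have hdx : d ≠ x := by simpa using hdhead
          have hxd : x ≤ d := hrest d (by
            rw [← hsplit, hdr']; simp)
          have hlt : x < d := lt_of_le_of_ne hxd (fun h => hdx h.symm)
          rw [hdr'] at hx
          rcases List.mem_cons.mp hx with h | h
          · exact hdx h.symm
          · have : d ≤ x := ((List.pairwise_cons.mp (by rwa [hdr'] at hdrsorted)).1) x h
            exact absurd this (not_le.mpr hlt)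
      have hcx : (x :: rest).count x = tk.length + 1 := by
        rw [← hsplit]
        have h1 : tk.count x = tk.length := List.count_eq_length.mpr (fun b hb => (htkx b hb).symm)
        have h2 : dr.count x = 0 := List.count_eq_zero.mpr hxdr
        simp [List.count_append, h1, h2]
      have hck : ∀ s : String, s ≠ x → (x :: rest).count s = dr.count s := by
        intro s hs
        rw [← hsplit]
        have h1 : tk.count s = 0 := List.count_eq_zero.mpr (fun h => hs (htkx s h))
        have hxs : ¬ x = s := fun h => hs h.symm
        simp [List.count_append, h1, hxs]
      -- dedup (x :: rest) = x :: dedup dr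
      have hdedup : PySem.List.dedup (x :: rest) = x :: PySem.List.dedup dr := by
        show (x :: rest).foldl PySem.Set.add PySem.Set.empty = x :: dr.foldl PySem.Set.add PySem.Set.empty
        rw [List.foldl_cons, ← hsplit, List.foldl_append]
        have hempty : PySem.Set.add PySem.Set.empty x = [x] := by
          simp [PySem.Set.add, PySem.Set.empty]
        rw [hempty, foldl_add_const x tk [x] htkx (by simp)]
        exact ofList_cons_shift x dr [] hxdr
      have hlen : dr.length ≤ k := by
        have hdl : dr.length ≤ rest.length := by
          rw [hdr]; exact List.length_dropWhile_le (fun y => y == x) rest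
        simp at h; omega
      rw [pvRuns, hdedup, List.map_cons, ih dr hlen hdrsorted]
      congr 1
      · rw [hcx]; push_cast; ring
      · apply List.map_congr_left
        intro s hs
        have hsdr : s ∈ dr := (PySem.Set.mem_ofList dr s).mp hs
        have hsx : s ≠ x := fun h => hxdr (h ▸ hsdr)
        rw [hck s hsx]

theorem count_fav_spec_aux (n : Int) (playlist : List String) (hne : playlist ≠ []) :
    count_fav n playlist = count_fav_alt n playlist := by
  simp only [count_fav, count_fav_alt]
  have hstep : (fun (d : PySem.Dict String Int) (singer : String) =>
      if d.contains singer then d.insert singer (d.getD singer 0 + 1)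
      else d.insert singer 1)
      = fun d singer => d.insert singer (d.getD singer 0 + 1) := by
    funext d s; exact step_eq d s
  rw [hstep]
  set d : PySem.Dict String Int :=
    playlist.foldl (fun d singer => d.insert singer (d.getD singer 0 + 1)) PySem.Dict.empty with hd
  -- A's values are the multiplicities of the distinct singers, in first-occurrence order
  have hkeys : d.keys = PySem.List.dedup playlist := by
    rw [hd, PySem.Dict.keys_foldl_insert]
    simp [PySem.Set.update, PySem.Dict.keys_empty, PySem.List.dedup, PySem.Set.ofList]
  have hnodup : d.keys.Nodup := by
    rw [hkeys]; exact PySem.Set.nodup_ofList playlist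
  have hvals : d.values = (PySem.List.dedup playlist).map (fun s => (playlist.count s : Int)) := by
    rw [PySem.Dict.values_eq_map_keys d hnodup 0, hkeys, List.map_congr_left]
    intro s _
    rw [hd, PySem.Dict.getD_foldl_insert_add_one]
    simp [PySem.Dict.getD_empty]
  -- B's run lengths are the same multiset
  set L : List String := PySem.List.sorted playlist (fun x => x) with hL
  have hperm : L.Perm playlist := PySem.List.sorted_perm playlist (fun x => x) false
  have hLsorted : L.Pairwise (fun a b => a ≤ b) := PySem.List.sorted_pairwise playlist (fun x => x)
  have hruns : pvRuns L = (PySem.List.dedup L).map (fun s => (L.count s : Int)) :=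
    runs_sorted L.length L (le_refl _) hLsorted
  have hdperm : (PySem.List.dedup L).Perm (PySem.List.dedup playlist) := by
    apply (List.perm_ext_iff_of_nodup (PySem.Set.nodup_ofList L) (PySem.Set.nodup_ofList playlist)).mpr
    intro a
    rw [PySem.Set.mem_ofList, PySem.Set.mem_ofList]
    exact ⟨fun h => hperm.mem_iff.mp h, fun h => hperm.mem_iff.mpr h⟩
  have hcfun : (fun s => (L.count s : Int)) = (fun s => (playlist.count s : Int)) := by
    funext s; rw [hperm.count_eq s]
  have hrunsperm : (pvRuns L).Perm d.values := by
    rw [hruns, hvals, hcfun]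
    exact hdperm.map _
  -- each multiplicity is ≥ 1
  have hpos : ∀ v ∈ d.values, 1 ≤ v := by
    intro v hv
    rw [hvals] at hv
    obtain ⟨s, hs, rfl⟩ := List.mem_map.mp hv
    have : s ∈ playlist := (PySem.Set.mem_ofList playlist s).mp hs
    have : 1 ≤ playlist.count s := List.count_pos_iff.mpr this
    omega
  have hvne : d.values ≠ [] := by
    intro hnil
    rcases List.exists_cons_of_ne_nil hne with ⟨a, t0, hpl⟩
    have ha : a ∈ PySem.List.dedup playlist := (PySem.Set.mem_ofList playlist a).mpr (by rw [hpl]; simp)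
    rw [hvals] at hnil
    rw [List.map_eq_nil_iff.mp hnil] at ha
    simp at ha
  obtain ⟨v, t, hvt⟩ := List.exists_cons_of_ne_nil hvne
  rw [hvt, PySem.List.max?_id_cons]
  simp only [Option.getD_some]
  set M : Int := t.foldl max v with hM
  have hv1 : 1 ≤ v := hpos v (by simp [hvt])
  -- B's side: the run-loop is the pair fold over the run lengths
  rw [pvRunLoop_eq_fold L.length L 0 0 (le_refl _), fold_pair]
  -- the two maxima agree (fold over a permutation; 0 is absorbed since v ≥ 1)
  have hmaxperm : (pvRuns L).foldl max 0 = d.values.foldl max 0 := hrunsperm.foldl_eq 0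
  have hmax0 : d.values.foldl max 0 = M := by
    rw [hvt, List.foldl_cons]
    have : max 0 v = v := by omega
    rw [this, hM]
  have hMv : (pvRuns L).foldl max 0 = M := by rw [hmaxperm, hmax0]
  have hM1 : 1 ≤ M := le_trans hv1 (PySem.List.le_foldl_max t v).1
  rw [hMv, if_neg (by omega : M ≠ 0), zero_add, hrunsperm.count_eq M, ← hvt]
  exact fold_count d.values M

-- ===== VERDICT (by name: the statement is the Claim_ definition above) =====
theorem count_fav_spec : Claim_equal_count_fav := by
  intro n playlist _ hpre
  exact count_fav_spec_aux n playlist hpre
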